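-- pv_equiv track=rewrite | github.com/mrigankpawagi/ProbeableProblems | code/q2/buggy/25_1.py | first_positive_integer
-- ===== SOURCE A (Python) =====
-- def first_positive_integer(input_string):
--     current_digit = ''
--     has_positive_integer = False
--
--     for char in input_string:
--         if char.isdigit():
--             current_digit += char
--         elif current_digit:
--             num = int(current_digit)
--             if num > 0:
--                 return num
--             current_digit = ''
--
--     if current_digit:
--         num = int(current_digit)
--         if num > 0:
--             return num
--
--     return 0
-- ===== SOURCE B (Python) =====
-- def first_positive_integer(input_string):
--     # Different algorithm: the first positive run is exactly the maximal digit run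
--     # containing the FIRST nonzero digit character (earlier digit runs are all-'0',
--     # hence parse to 0).  Locate that character, expand to its run, parse once.
--     for i, ch in enumerate(input_string):
--         if '1' <= ch <= '9':
--             lo = i
--             while lo > 0 and input_string[lo - 1].isdigit():
--                 lo -= 1
--             hi = i + 1
--             while hi < len(input_string) and input_string[hi].isdigit():
--                 hi += 1
--             return int(input_string[lo:hi])
--     return 0
-- ===== Notes on version B (the rewrite author's own statement) =====
-- stated objective: alternative
-- what changed: Instead of scanning while accumulating each digit run and testing it at run end, B searches for the first nonzero digit character, expands left/right to the maximal digit run containing it, and parses only that run (earlier digit runs are all-'0' and parse to 0).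
import Mathlib
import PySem

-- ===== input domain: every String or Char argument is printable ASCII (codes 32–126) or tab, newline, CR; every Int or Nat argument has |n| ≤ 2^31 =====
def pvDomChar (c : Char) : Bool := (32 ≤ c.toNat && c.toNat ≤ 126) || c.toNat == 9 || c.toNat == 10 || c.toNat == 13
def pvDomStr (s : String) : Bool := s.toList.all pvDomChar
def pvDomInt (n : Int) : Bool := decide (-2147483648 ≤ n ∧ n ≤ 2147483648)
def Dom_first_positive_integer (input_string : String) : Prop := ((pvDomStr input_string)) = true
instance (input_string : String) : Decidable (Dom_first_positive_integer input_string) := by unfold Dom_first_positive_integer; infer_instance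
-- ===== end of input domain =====

-- B replaces A's run-accumulating scan by a different algorithm: locate the FIRST
-- nonzero digit character, expand to the maximal digit run containing it, parse that
-- run once (correct because every earlier digit run is all-'0' and parses to 0).

-- int(s) for a nonempty run of ASCII digits (exact there: no sign, no spaces, base 10);
-- both programs only ever parse such runs, since str.isdigit on printable ASCII is '0'..'9' = Char.isDigit.
def pvIntOfDigits (cs : List Char) : Int :=
  cs.foldl (fun a c => a * 10 + ((c.toNat : Int) - ('0'.toNat : Int))) 0

-- ===== PORT A =====
-- the for-loop with early return, state = current_digit (as list of chars)
def pvLoopA : List Char → List Char → Int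
  | [], cur =>
    -- after the loop: if current_digit: num = int(current_digit); if num > 0: return num; return 0
    if cur = [] then 0
    else
      let num := pvIntOfDigits cur
      if num > 0 then num else 0
  | c :: rest, cur =>
    if c.isDigit then pvLoopA rest (cur ++ [c])
    else if cur ≠ [] then
      let num := pvIntOfDigits cur
      if num > 0 then num else pvLoopA rest []
    else pvLoopA rest []

def first_positive_integer (input_string : String) : Int :=
  pvLoopA input_string.toList []

-- ===== PORT B =====
-- while lo > 0 and input_string[lo-1].isdigit(): lo -= 1
-- (getD is exact: the index lo-1 is always in range when lo ≤ len, as in B)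
def pvExpandLo (s : List Char) : Nat → Nat
  | 0 => 0
  | lo + 1 => if (s.getD lo ' ').isDigit then pvExpandLo s lo else lo + 1

-- while hi < len(input_string) and input_string[hi].isdigit(): hi += 1
def pvExpandHi (s : List Char) (hi : Nat) : Nat :=
  if h : hi < s.length ∧ (s.getD hi ' ').isDigit then pvExpandHi s (hi + 1) else hi
termination_by s.length - hi
decreasing_by omega

-- for i, ch in enumerate(input_string): … with early return
def pvFindLoop (s : List Char) : Nat → List Char → Int
  | _, [] => 0
  | i, c :: rest =>
    if '1' ≤ c ∧ c ≤ '9' then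
      let lo := pvExpandLo s i
      let hi := pvExpandHi s (i + 1)
      -- input_string[lo:hi]: exact since 0 ≤ lo ≤ hi ≤ len holds here
      pvIntOfDigits ((s.drop lo).take (hi - lo))
    else pvFindLoop s (i + 1) rest

def first_positive_integer_alt (input_string : String) : Int :=
  pvFindLoop input_string.toList 0 input_string.toList

-- ===== PRECONDITION & SPEC =====
def Spec_first_positive_integer (input_string : String) (out : Int) : Prop := out = first_positive_integer_alt input_string
instance (input_string : String) (out : Int) : Decidable (Spec_first_positive_integer input_string out) := by unfold Spec_first_positive_integer; infer_instance

-- ===== CLAIM (what is proved, stated in full; the proofs are below) =====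
def Claim_equal_first_positive_integer : Prop := ∀ (input_string : String), Dom_first_positive_integer input_string → Spec_first_positive_integer input_string (first_positive_integer input_string)

-- ===== LEMMAS AND PROOFS =====

-- ---- character facts ----
lemma pvCharLe_iff (a b : Char) : a ≤ b ↔ a.toNat ≤ b.toNat := by
  rw [Char.le_def, UInt32.le_iff_toNat_le]; rfl

lemma pvIsDigit_iff (c : Char) : c.isDigit = true ↔ 48 ≤ c.toNat ∧ c.toNat ≤ 57 := by
  constructor
  · intro h
    simp only [Char.isDigit, Bool.and_eq_true, decide_eq_true_eq, ge_iff_le,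
      UInt32.le_iff_toNat_le] at h
    have h0 : ('0'.val.toNat) = 48 := by decide
    have h9 : ('9'.val.toNat) = 57 := by decide
    rw [h0, h9] at h
    exact h
  · intro h
    simp only [Char.isDigit, Bool.and_eq_true, decide_eq_true_eq, ge_iff_le,
      UInt32.le_iff_toNat_le]
    have h0 : ('0'.val.toNat) = 48 := by decide
    have h9 : ('9'.val.toNat) = 57 := by decide
    rw [h0, h9]
    exact h

lemma pvChar_eq_of_toNat (c : Char) (n : Nat) (hc : c.toNat = n) (d : Char) (hd : d.toNat = n) : c = d := by
  apply Char.ext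
  apply UInt32.toNat_inj.mp
  show c.toNat = d.toNat
  rw [hc, hd]

lemma pvNz_iff (c : Char) : ('1' ≤ c ∧ c ≤ '9') ↔ 49 ≤ c.toNat ∧ c.toNat ≤ 57 := by
  rw [pvCharLe_iff, pvCharLe_iff]
  have h1 : ('1'.toNat) = 49 := by decide
  have h9 : ('9'.toNat) = 57 := by decide
  rw [h1, h9]

lemma pvDigit_not_nz (c : Char) (h : c.isDigit = true) (h2 : ¬('1' ≤ c ∧ c ≤ '9')) : c = '0' := by
  rw [pvIsDigit_iff] at h; rw [pvNz_iff] at h2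
  exact pvChar_eq_of_toNat c 48 (by omega) '0' (by decide)

lemma pvNz_isDigit (c : Char) (h : '1' ≤ c ∧ c ≤ '9') : c.isDigit = true := by
  rw [pvNz_iff] at h; rw [pvIsDigit_iff]; omega

lemma pvZero_not_nz : ¬('1' ≤ '0' ∧ '0' ≤ '9') := by decide

lemma pvNondigit_not_nz (c : Char) (h : ¬ c.isDigit = true) : ¬('1' ≤ c ∧ c ≤ '9') := by
  intro hnz; exact h (pvNz_isDigit c hnz)

-- ---- pvIntOfDigits facts ----
lemma pvFold_ge (l : List Char) : ∀ a : Int, (∀ c ∈ l, c.isDigit = true) → 0 ≤ a →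
    a ≤ l.foldl (fun a c => a * 10 + ((c.toNat : Int) - ('0'.toNat : Int))) a := by
  induction l with
  | nil => intro a _ _; simp
  | cons c t ih =>
    intro a hd ha
    have hc := (pvIsDigit_iff c).mp (hd c (List.mem_cons_self ..))
    have h0 : ('0'.toNat : Int) = 48 := by decide
    have hstep : a ≤ a * 10 + ((c.toNat : Int) - ('0'.toNat : Int)) := by rw [h0]; omega
    have hnn : 0 ≤ a * 10 + ((c.toNat : Int) - ('0'.toNat : Int)) := le_trans ha hstep
    calc a ≤ a * 10 + ((c.toNat : Int) - ('0'.toNat : Int)) := hstep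
      _ ≤ _ := ih _ (fun x hx => hd x (List.mem_cons_of_mem _ hx)) hnn

lemma pvIntOfDigits_cons_zero (l : List Char) : pvIntOfDigits ('0' :: l) = pvIntOfDigits l := by
  unfold pvIntOfDigits
  simp only [List.foldl_cons]
  norm_num

lemma pvIntOfDigits_zeros_prefix (z : List Char) (hz : ∀ c ∈ z, c = '0') (l : List Char) :
    pvIntOfDigits (z ++ l) = pvIntOfDigits l := by
  induction z with
  | nil => simp
  | cons c t ih =>
    have hc : c = '0' := hz c (List.mem_cons_self ..)
    subst hc
    rw [List.cons_append, pvIntOfDigits_cons_zero]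
    exact ih (fun x hx => hz x (List.mem_cons_of_mem _ hx))

lemma pvIntOfDigits_all_zero (l : List Char) (hz : ∀ c ∈ l, c = '0') :
    pvIntOfDigits l = 0 := by
  have := pvIntOfDigits_zeros_prefix l hz []
  simpa using this

lemma pvIntOfDigits_pos (z : List Char) (hz : ∀ c ∈ z, c = '0') (c : Char)
    (hc : '1' ≤ c ∧ c ≤ '9') (r : List Char) (hr : ∀ x ∈ r, x.isDigit = true) :
    0 < pvIntOfDigits (z ++ c :: r) := by
  rw [pvIntOfDigits_zeros_prefix z hz]
  have hcv := (pvNz_iff c).mp hc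
  have h0 : ('0'.toNat : Int) = 48 := by decide
  unfold pvIntOfDigits
  simp only [List.foldl_cons]
  have hstart : (0 : Int) < 0 * 10 + ((c.toNat : Int) - ('0'.toNat : Int)) := by
    rw [h0]; push_cast; omega
  exact lt_of_lt_of_le hstart (pvFold_ge r _ hr (le_of_lt hstart))

-- ---- the group decomposition of the input (proof-only helpers) ----
def pvGroups : List Char → List (Bool × List Char)
  | [] => []
  | c :: rest =>
    let k := c.isDigit
    (k, c :: rest.takeWhile (fun x => x.isDigit = k)) ::
      pvGroups (rest.dropWhile (fun x => x.isDigit = k))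
termination_by l => l.length
decreasing_by
  exact Nat.lt_of_le_of_lt (List.length_dropWhile_le _ _) (by simp)

def pvScanB : List (Bool × List Char) → Int
  | [] => 0
  | (k, run) :: gs =>
    if k then
      let num := pvIntOfDigits run
      if num > 0 then num else pvScanB gs
    else pvScanB gs

lemma pvGroups_nil : pvGroups [] = [] := by rw [pvGroups]

lemma pvGroups_cons (c : Char) (rest : List Char) :
    pvGroups (c :: rest) =
      (c.isDigit, c :: rest.takeWhile (fun x => x.isDigit = c.isDigit)) ::
        pvGroups (rest.dropWhile (fun x => x.isDigit = c.isDigit)) := by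
  rw [pvGroups]

lemma pvDropWhileHeadNot {p : Char → Bool} : ∀ (l : List Char) (d : Char) (ds : List Char),
    l.dropWhile p = d :: ds → p d = false := by
  intro l
  induction l with
  | nil => intro d ds h; simp [List.dropWhile] at h
  | cons a l ih =>
    intro d ds h
    by_cases hp : p a = true
    · rw [List.dropWhile_cons_of_pos hp] at h
      exact ih _ _ h
    · rw [List.dropWhile_cons_of_neg hp] at h
      cases h
      simpa using hp

-- ---- A equals the group scan ----
lemma pvLoopA_digits (run : List Char) (h : ∀ c ∈ run, c.isDigit = true) :
    ∀ rest cur, pvLoopA (run ++ rest) cur = pvLoopA rest (cur ++ run) := by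
  induction run with
  | nil => simp
  | cons c cs ih =>
    intro rest cur
    have hc : c.isDigit = true := h c (List.mem_cons_self ..)
    simp only [List.cons_append, pvLoopA, hc, if_true]
    rw [ih (fun x hx => h x (List.mem_cons_of_mem _ hx)) rest (cur ++ [c])]
    simp

lemma pvLoopA_skip (nd : List Char) (h : ∀ c ∈ nd, ¬ c.isDigit = true) :
    ∀ rest, pvLoopA (nd ++ rest) [] = pvLoopA rest [] := by
  induction nd with
  | nil => simp
  | cons c cs ih =>
    intro rest
    have hc : ¬ c.isDigit = true := h c (List.mem_cons_self ..)
    simp only [List.cons_append, pvLoopA, hc]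
    simpa using ih (fun x hx => h x (List.mem_cons_of_mem _ hx)) rest

lemma pvMain : ∀ cs : List Char, pvLoopA cs [] = pvScanB (pvGroups cs) := by
  intro cs
  induction hn : cs.length using Nat.strong_induction_on generalizing cs with
  | _ n ih =>
  match cs with
  | [] => simp [pvLoopA, pvGroups_nil, pvScanB]
  | c :: rest =>
    by_cases hc : c.isDigit = true
    · have hgc := pvGroups_cons c rest
      simp only [hc] at hgc
      have hrun : ∀ x ∈ c :: rest.takeWhile (fun x => x.isDigit = true), x.isDigit = true := by
        intro x hx
        rcases List.mem_cons.mp hx with h | h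
        · exact h ▸ hc
        · have := List.mem_takeWhile_imp h
          simpa using this
      have hsplit : c :: rest =
          (c :: rest.takeWhile (fun x => x.isDigit = true)) ++
            rest.dropWhile (fun x => x.isDigit = true) := by
        simp [List.takeWhile_append_dropWhile]
      have h1 : pvLoopA (c :: rest) [] =
          pvLoopA (rest.dropWhile (fun x => x.isDigit = true))
            (c :: rest.takeWhile (fun x => x.isDigit = true)) := by
        conv_lhs => rw [hsplit]
        have := pvLoopA_digits _ hrun (rest.dropWhile (fun x => x.isDigit = true)) []
        simpa only [List.nil_append, List.cons_append] using this
      rw [h1, hgc]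
      rcases hd : rest.dropWhile (fun x => x.isDigit = true) with _ | ⟨d, ds⟩
      · rw [hd]
        simp [pvLoopA, pvScanB, pvGroups_nil]
      · rw [hd]
        have hdnd : d.isDigit = false := by
          have := pvDropWhileHeadNot (p := fun x => x.isDigit = true) rest d ds hd
          simpa using this
        have hA : pvLoopA (d :: ds) (c :: rest.takeWhile (fun x => x.isDigit = true)) =
            if 0 < pvIntOfDigits (c :: rest.takeWhile (fun x => x.isDigit = true)) then
              pvIntOfDigits (c :: rest.takeWhile (fun x => x.isDigit = true))
            else pvLoopA ds [] := by
          simp [pvLoopA, hdnd]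
        have hB : pvScanB ((true, c :: rest.takeWhile (fun x => x.isDigit = true)) :: pvGroups (d :: ds)) =
            if 0 < pvIntOfDigits (c :: rest.takeWhile (fun x => x.isDigit = true)) then
              pvIntOfDigits (c :: rest.takeWhile (fun x => x.isDigit = true))
            else pvScanB (pvGroups (d :: ds)) := by
          simp [pvScanB]
        rw [hA, hB]
        have hndrun : ∀ x ∈ ds.takeWhile (fun x => x.isDigit = false), ¬ x.isDigit = true := by
          intro x hx
          have := List.mem_takeWhile_imp hx
          simp only [decide_eq_true_eq] at this
          simp [this]
        have hskip : pvLoopA ds [] = pvLoopA (ds.dropWhile (fun x => x.isDigit = false)) [] := by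
          conv_lhs => rw [← List.takeWhile_append_dropWhile (p := fun x => x.isDigit = false) (l := ds)]
          exact pvLoopA_skip _ hndrun _
        have hlen2 : (ds.dropWhile (fun x => x.isDigit = false)).length < n := by
          have h1 := List.length_dropWhile_le (fun x => x.isDigit = false) ds
          have h2 := List.length_dropWhile_le (fun x => x.isDigit = true) rest
          rw [hd] at h2
          simp only [List.length_cons] at h2 hn
          omega
        have hrest : pvLoopA ds [] = pvScanB (pvGroups (d :: ds)) := by
          rw [hskip, ih _ hlen2 _ rfl, pvGroups_cons d ds]
          simp only [hdnd]
          simp [pvScanB]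
        rw [hrest]
    · have hcb : c.isDigit = false := by simpa using hc
      have hgc := pvGroups_cons c rest
      simp only [hcb] at hgc
      have h0 : pvLoopA (c :: rest) [] = pvLoopA rest [] := by
        simp [pvLoopA, hcb]
      have hndrun : ∀ x ∈ rest.takeWhile (fun x => x.isDigit = false), ¬ x.isDigit = true := by
        intro x hx
        have := List.mem_takeWhile_imp hx
        simp only [decide_eq_true_eq] at this
        simp [this]
      have hskip : pvLoopA rest [] = pvLoopA (rest.dropWhile (fun x => x.isDigit = false)) [] := by
        conv_lhs => rw [← List.takeWhile_append_dropWhile (p := fun x => x.isDigit = false) (l := rest)]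
        exact pvLoopA_skip _ hndrun _
      have hlen : (rest.dropWhile (fun x => x.isDigit = false)).length < n := by
        have := List.length_dropWhile_le (fun x => x.isDigit = false) rest
        simp only [List.length_cons] at hn
        omega
      rw [h0, hskip, ih _ hlen _ rfl, hgc]
      simp [pvScanB]

-- ---- B-side plumbing ----

lemma pvTake_succ_reverse (s : List Char) (j : Nat) (h : j < s.length) :
    (s.take (j + 1)).reverse = s.getD j ' ' :: (s.take j).reverse := by
  rw [List.take_add_one]
  have : s[j]? = some s[j] := List.getElem?_eq_getElem h
  simp [this, List.getD_eq_getElem?_getD]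

lemma pvTakeWhile_all_append {p : Char → Bool} (l1 l2 : List Char) (h : ∀ c ∈ l1, p c = true) :
    (l1 ++ l2).takeWhile p = l1 ++ l2.takeWhile p := by
  induction l1 with
  | nil => simp
  | cons a t ih =>
    have ha := h a (List.mem_cons_self ..)
    simp only [List.cons_append, List.takeWhile_cons_of_pos ha]
    rw [ih (fun x hx => h x (List.mem_cons_of_mem _ hx))]

-- pvExpandLo computes the start of the maximal digit run ending before j
lemma pvExpandLo_eq (s : List Char) : ∀ j, j ≤ s.length →
    pvExpandLo s j = j - ((s.take j).reverse.takeWhile Char.isDigit).length := by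
  intro j
  induction j with
  | zero => intro _; simp [pvExpandLo]
  | succ j ih =>
    intro hj
    have hjlt : j < s.length := by omega
    rw [pvExpandLo, pvTake_succ_reverse s j hjlt]
    by_cases hd : (s.getD j ' ').isDigit = true
    · rw [if_pos hd, List.takeWhile_cons_of_pos hd, ih (by omega)]
      simp only [List.length_cons]
      omega
    · rw [if_neg hd, List.takeWhile_cons_of_neg (by simpa using hd)]
      simp

-- pvExpandHi computes the end of the maximal digit run starting at h
lemma pvExpandHi_eq (s : List Char) : ∀ h, pvExpandHi s h = h + ((s.drop h).takeWhile Char.isDigit).length := by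
  intro h
  induction hfuel : s.length - h using Nat.strong_induction_on generalizing h with
  | _ n ih =>
  rw [pvExpandHi]
  by_cases hc : h < s.length ∧ (s.getD h ' ').isDigit = true
  · rw [dif_pos hc]
    have hdrop : s.drop h = s.getD h ' ' :: s.drop (h + 1) := by
      rw [List.drop_eq_getElem_cons hc.1]
      congr 1
      simp [List.getD_eq_getElem?_getD, List.getElem?_eq_getElem hc.1]
    rw [ih (s.length - (h+1)) (by omega) (h+1) rfl, hdrop,
      List.takeWhile_cons_of_pos hc.2]
    simp only [List.length_cons]
    omega
  · rw [dif_neg hc]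
    rcases Nat.lt_or_ge h s.length with hlt | hge
    · have hnd : ¬ (s.getD h ' ').isDigit = true := fun hd => hc ⟨hlt, hd⟩
      have hdrop : s.drop h = s.getD h ' ' :: s.drop (h + 1) := by
        rw [List.drop_eq_getElem_cons hlt]
        congr 1
        simp [List.getD_eq_getElem?_getD, List.getElem?_eq_getElem hlt]
      rw [hdrop, List.takeWhile_cons_of_neg (by simpa using hnd)]
      simp
    · rw [List.drop_eq_nil_of_le hge]
      simp

-- the find-loop steps over characters that are not in '1'..'9'
lemma pvFindLoop_skip (s : List Char) (pre : List Char)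
    (h : ∀ c ∈ pre, ¬('1' ≤ c ∧ c ≤ '9')) :
    ∀ i tail, pvFindLoop s i (pre ++ tail) = pvFindLoop s (i + pre.length) tail := by
  induction pre with
  | nil => intro i tail; simp
  | cons c t ih =>
    intro i tail
    have hc := h c (List.mem_cons_self ..)
    simp only [List.cons_append, pvFindLoop, if_neg hc]
    rw [ih (fun x hx => h x (List.mem_cons_of_mem _ hx)) (i+1) tail]
    simp only [List.length_cons]
    congr 1
    omega

-- invariant: every digit in the maximal digit run of s ending just before i is '0'
def pvZpre (s : List Char) (i : Nat) : Prop :=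
  ∀ c ∈ (s.take i).reverse.takeWhile Char.isDigit, c = '0'

-- B equals the group scan
lemma pvMainB (s : List Char) : ∀ cs i, s.drop i = cs → pvZpre s i →
    pvFindLoop s i cs = pvScanB (pvGroups cs) := by
  intro cs
  induction hn : cs.length using Nat.strong_induction_on generalizing cs with
  | _ n ih =>
  match cs with
  | [] => intro i _ _; simp [pvFindLoop, pvGroups_nil, pvScanB]
  | c :: rest =>
    intro i hdrop hz
    have hilen : i < s.length := by
      by_contra hge
      rw [List.drop_eq_nil_of_le (by omega)] at hdrop
      simp at hdrop
    by_cases hc : c.isDigit = true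
    · -- leading maximal digit run
      set run := c :: rest.takeWhile (fun x => x.isDigit = true) with hrundef
      set tail := rest.dropWhile (fun x => x.isDigit = true) with htaildef
      have hgc := pvGroups_cons c rest
      simp only [hc] at hgc
      have hrun : ∀ x ∈ run, x.isDigit = true := by
        intro x hx
        rcases List.mem_cons.mp hx with h | h
        · exact h ▸ hc
        · have := List.mem_takeWhile_imp h
          simpa using this
      have hsplit : (c :: rest : List Char) = run ++ tail := by
        simp [hrundef, htaildef, List.takeWhile_append_dropWhile]
      have hrunlen : 0 < run.length := by simp [hrundef]
      have hdroptail : s.drop (i + run.length) = tail := by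
        rw [← List.drop_drop, hdrop, hsplit, List.drop_left]
      have htailhead : ∀ x ∈ tail.takeWhile Char.isDigit, False := by
        intro x hx
        rcases ht : tail with _ | ⟨d, ds⟩
        · rw [ht] at hx; simp at hx
        · have hdnd : d.isDigit = false := by
            have := pvDropWhileHeadNot (p := fun x => x.isDigit = true) rest d ds ht
            simpa using this
          rw [ht, List.takeWhile_cons_of_neg (by simp [hdnd])] at hx
          simp at hx
      have htailtw : tail.takeWhile Char.isDigit = [] := by
        rcases h : tail.takeWhile Char.isDigit with _ | ⟨x, xs⟩
        · rfl
        · exact absurd (h ▸ List.mem_cons_self ..) (fun hx => htailhead x hx)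
      -- s.take (i + run.length) = s.take i ++ run
      have htakeirun : s.take (i + run.length) = s.take i ++ run := by
        rw [List.take_add, hdrop, hsplit, List.take_left]
      by_cases hzrun : ∀ x ∈ run, x = '0'
      · -- all-zero run: both sides skip it
        have hnonnz : ∀ x ∈ run, ¬('1' ≤ x ∧ x ≤ '9') := by
          intro x hx
          rw [hzrun x hx]
          exact pvZero_not_nz
        have hB : pvFindLoop s i (c :: rest) = pvFindLoop s (i + run.length) tail := by
          conv_lhs => rw [hsplit]
          exact pvFindLoop_skip s run hnonnz i tail
        have hz' : pvZpre s (i + run.length) := by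
          intro x hx
          rw [htakeirun, List.reverse_append,
            pvTakeWhile_all_append run.reverse _ (by
              intro y hy; exact hrun y (List.mem_reverse.mp hy))] at hx
          rcases List.mem_append.mp hx with h | h
          · exact hzrun x (List.mem_reverse.mp h)
          · exact hz x h
        have hlen : tail.length < n := by
          have : (run ++ tail).length = n := by rw [← hsplit]; simpa using hn
          simp only [List.length_append] at this
          omega
        have hval : pvIntOfDigits run = 0 := pvIntOfDigits_all_zero run hzrun
        rw [hB, ih _ hlen tail rfl _ hdroptail hz', hgc, ← hrundef, ← htaildef]
        simp [pvScanB, hval]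
      · -- the run contains a nonzero digit: both sides return its value
        -- decompose run = zs ++ c' :: rs with zs all '0' and c' in '1'..'9'
        set zs := run.takeWhile (fun x => x == '0') with hzsdef
        set ds := run.dropWhile (fun x => x == '0') with hdsdef
        have hzszero : ∀ x ∈ zs, x = '0' := by
          intro x hx
          have := List.mem_takeWhile_imp hx
          simpa using this
        have hrunsplit : run = zs ++ ds := by
          rw [hzsdef, hdsdef, List.takeWhile_append_dropWhile]
        rcases hdscases : ds with _ | ⟨c', rs⟩
        · exfalso
          apply hzrun
          intro x hx
          rw [hrunsplit, hdscases, List.append_nil] at hx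
          exact hzszero x hx
        · have hc'ne : c' ≠ '0' := by
            have hh := pvDropWhileHeadNot (p := fun x => x == '0') run c' rs (hdscases ▸ hdsdef.symm)
            simpa using hh
          have hc'mem : c' ∈ run := by
            rw [hrunsplit, hdscases]; exact List.mem_append_right _ (List.mem_cons_self ..)
          have hc'dig : c'.isDigit = true := hrun c' hc'mem
          have hc'nz : '1' ≤ c' ∧ c' ≤ '9' := by
            by_contra hno
            exact hc'ne (pvDigit_not_nz c' hc'dig hno)
          have hrsdig : ∀ x ∈ rs, x.isDigit = true := by
            intro x hx
            apply hrun
            rw [hrunsplit, hdscases]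
            exact List.mem_append_right _ (List.mem_cons_of_mem _ hx)
          -- B: skip zs, then fire at position p = i + zs.length
          set p := i + zs.length with hpdef
          have hznonnz : ∀ x ∈ zs, ¬('1' ≤ x ∧ x ≤ '9') := by
            intro x hx; rw [hzszero x hx]; exact pvZero_not_nz
          have hB1 : pvFindLoop s i (c :: rest) = pvFindLoop s p (c' :: (rs ++ tail)) := by
            conv_lhs => rw [hsplit, hrunsplit, hdscases]
            rw [List.append_assoc]
            have := pvFindLoop_skip s zs hznonnz i ((c' :: rs) ++ tail)
            simpa using this
          have hB2 : pvFindLoop s p (c' :: (rs ++ tail)) =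
              pvIntOfDigits ((s.drop (pvExpandLo s p)).take (pvExpandHi s (p + 1) - pvExpandLo s p)) := by
            rw [pvFindLoop, if_pos hc'nz]
          -- compute the take-prefix at p
          have htakep : s.take p = s.take i ++ zs := by
            rw [hpdef, List.take_add, hdrop, hsplit, hrunsplit]
            congr 1
            rw [List.append_assoc, List.take_left]
          -- the digit suffix before i
          set Z := (s.take i).reverse.takeWhile Char.isDigit with hZdef
          have hZzero : ∀ x ∈ Z, x = '0' := hz
          have hZdig : ∀ x ∈ Z, x.isDigit = true := by
            intro x hx
            have := List.mem_takeWhile_imp hx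
            simpa using this
          have hZpref := List.takeWhile_prefix (l := (s.take i).reverse) (p := Char.isDigit)
          obtain ⟨W, hW⟩ := hZpref
          rw [← hZdef] at hW
          -- lengths
          have htakei_len : (s.take i).length = i := by
            rw [List.length_take]; omega
          have hZlen_le : Z.length ≤ i := by
            have h2 := congrArg List.length hW
            simp only [List.length_append, List.length_reverse, htakei_len] at h2
            omega
          -- lo
          have hplen : p ≤ s.length := by
            have : s.drop p = c' :: (rs ++ tail) := by
              have h1 : (s.drop i).drop zs.length = s.drop p := by
                rw [List.drop_drop, hpdef, Nat.add_comm]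
              rw [← h1, hdrop, hsplit, hrunsplit, hdscases, List.append_assoc, List.drop_left]
              simp
            by_contra hgt
            rw [List.drop_eq_nil_of_le (by omega)] at this
            simp at this
          have hzsrevdig : ∀ y ∈ zs.reverse, y.isDigit = true := by
            intro y hy
            have := hzszero y (List.mem_reverse.mp hy)
            rw [this]; decide
          have htwp : (s.take p).reverse.takeWhile Char.isDigit = zs.reverse ++ Z := by
            rw [htakep, List.reverse_append, pvTakeWhile_all_append zs.reverse _ hzsrevdig, hZdef]
          have hlo : pvExpandLo s p = i - Z.length := by
            rw [pvExpandLo_eq s p hplen, htwp]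
            simp only [List.length_append, List.length_reverse]
            omega
          -- hi
          have hdropp1 : s.drop (p + 1) = rs ++ tail := by
            have h1 : (s.drop i).drop (zs.length + 1) = s.drop (p + 1) := by
              rw [List.drop_drop]; congr 1; try omega
            rw [← h1, hdrop, hsplit, hrunsplit, hdscases]
            have harr : (zs ++ c' :: rs) ++ tail = (zs ++ [c']) ++ (rs ++ tail) := by simp
            rw [harr]
            have hlen1 : (zs ++ [c']).length = zs.length + 1 := by simp
            rw [← hlen1, List.drop_left]
          have hhi : pvExpandHi s (p + 1) = i + run.length := by
            rw [pvExpandHi_eq, hdropp1, pvTakeWhile_all_append rs _ hrsdig, htailtw,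
              List.append_nil]
            have : run.length = zs.length + 1 + rs.length := by
              rw [hrunsplit, hdscases]
              simp only [List.length_append, List.length_cons]
              omega
            omega
          -- the slice
          have hstake : s.take i = W.reverse ++ Z.reverse := by
            have h2 := congrArg List.reverse hW
            simp only [List.reverse_append, List.reverse_reverse] at h2
            exact h2.symm
          have hWlen : W.length = i - Z.length := by
            have h2 := congrArg List.length hW
            simp only [List.length_append, List.length_reverse, htakei_len] at h2
            omega
          have hsdecomp : s = W.reverse ++ Z.reverse ++ (run ++ tail) := by
            conv_lhs => rw [← List.take_append_drop i s, hstake, hdrop, hsplit]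
          have hslice : (s.drop (pvExpandLo s p)).take (pvExpandHi s (p + 1) - pvExpandLo s p)
              = Z.reverse ++ run := by
            have hWrl : W.reverse.length = i - Z.length := by
              rw [List.length_reverse]; exact hWlen
            rw [hlo, hhi, hsdecomp, List.append_assoc, ← hWrl, List.drop_left]
            have heq : i + run.length - W.reverse.length = Z.length + run.length := by
              rw [List.length_reverse]; omega
            rw [heq]
            have harr : Z.reverse ++ (run ++ tail) = (Z.reverse ++ run) ++ tail := by simp
            rw [harr]
            have hlen2 : Z.length + run.length = (Z.reverse ++ run).length := by simp
            rw [hlen2, List.take_left]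
          have hval : pvIntOfDigits (Z.reverse ++ run) = pvIntOfDigits run := by
            apply pvIntOfDigits_zeros_prefix
            intro x hx
            exact hZzero x (List.mem_reverse.mp hx)
          have hpos : 0 < pvIntOfDigits run := by
            rw [hrunsplit, hdscases]
            exact pvIntOfDigits_pos zs hzszero c' hc'nz rs hrsdig
          rw [hB1, hB2, hslice, hval, hgc, ← hrundef, ← htaildef]
          simp [pvScanB, hpos]
    · -- leading maximal non-digit run: both sides skip it
      have hcb : c.isDigit = false := by simpa using hc
      set run := c :: rest.takeWhile (fun x => x.isDigit = false) with hrundef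
      set tail := rest.dropWhile (fun x => x.isDigit = false) with htaildef
      have hgc := pvGroups_cons c rest
      simp only [hcb] at hgc
      have hrun : ∀ x ∈ run, x.isDigit = false := by
        intro x hx
        rcases List.mem_cons.mp hx with h | h
        · exact h ▸ hcb
        · have := List.mem_takeWhile_imp h
          simpa using this
      have hsplit : (c :: rest : List Char) = run ++ tail := by
        simp [hrundef, htaildef, List.takeWhile_append_dropWhile]
      have hnonnz : ∀ x ∈ run, ¬('1' ≤ x ∧ x ≤ '9') := by
        intro x hx
        exact pvNondigit_not_nz x (by simp [hrun x hx])
      have hB : pvFindLoop s i (c :: rest) = pvFindLoop s (i + run.length) tail := by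
        conv_lhs => rw [hsplit]
        exact pvFindLoop_skip s run hnonnz i tail
      have hdroptail : s.drop (i + run.length) = tail := by
        rw [← List.drop_drop, hdrop, hsplit, List.drop_left]
      have htakeirun : s.take (i + run.length) = s.take i ++ run := by
        rw [List.take_add, hdrop, hsplit, List.take_left]
      have hz' : pvZpre s (i + run.length) := by
        intro x hx
        rw [htakeirun, List.reverse_append] at hx
        exfalso
        rcases hrr : run.reverse with _ | ⟨b, bs⟩
        · rw [hrundef] at hrr; simp at hrr
        · have hb : b ∈ run := List.mem_reverse.mp (hrr ▸ List.mem_cons_self ..)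
          rw [hrr] at hx
          simp only [List.cons_append] at hx
          rw [List.takeWhile_cons_of_neg (by simp [hrun b hb])] at hx
          simp at hx
      have hlen : tail.length < n := by
        have : (run ++ tail).length = n := by rw [← hsplit]; simpa using hn
        simp only [List.length_append, hrundef, List.length_cons] at this ⊢
        omega
      rw [hB, ih _ hlen tail rfl _ hdroptail hz', hgc, ← hrundef, ← htaildef]
      simp [pvScanB]

-- ===== VERDICT (by name: the statement is the Claim_ definition above) =====
theorem first_positive_integer_spec : Claim_equal_first_positive_integer := by
  intro s _
  unfold Spec_first_positive_integer first_positive_integer first_positive_integer_alt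
  rw [pvMain s.toList]
  rw [pvMainB s.toList s.toList 0 (by simp) (by intro c hc; simp at hc)]
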